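-- pv_equiv track=rewrite | github.com/sandraschi/virtualization-mcp | src/virtualization_mcp/api/documentation.py | _get_tag_for_endpoint
-- ===== SOURCE A (Python) =====
-- def _get_tag_for_endpoint(endpoint: str) -> str:
--     """Determine the tag for an endpoint based on its path."""
--     if '/vm/' in endpoint:
--         return "VM Lifecycle"
--     elif '/snapshot/' in endpoint:
--         return "Snapshots"
--     elif '/storage/' in endpoint:
--         return "Storage"
--     elif '/network/' in endpoint:
--         return "Networking"
--     elif '/device/' in endpoint:
--         return "Devices"
--     elif '/template/' in endpoint:
--         return "Templates"
--     elif '/metrics/' in endpoint: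
--         return "Metrics"
--     elif any(x in endpoint for x in ['/audio/', '/video/']):
--         return "Audio/Video"
--     else:
--         return "System"
-- ===== SOURCE B (Python) =====
-- _SEGMENT_TAGS = {
--     'vm': (0, "VM Lifecycle"),
--     'snapshot': (1, "Snapshots"),
--     'storage': (2, "Storage"),
--     'network': (3, "Networking"),
--     'device': (4, "Devices"),
--     'template': (5, "Templates"),
--     'metrics': (6, "Metrics"),
--     'audio': (7, "Audio/Video"),
--     'video': (8, "Audio/Video"),
-- }
--
--
-- def _get_tag_for_endpoint(endpoint: str) -> str:
--     """Determine the tag for an endpoint based on its path."""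
--     best = None
--     for segment in endpoint.split('/')[1:-1]:
--         entry = _SEGMENT_TAGS.get(segment)
--         if entry is not None and (best is None or entry[0] < best[0]):
--             best = entry
--     return best[1] if best is not None else "System"
-- ===== Notes on version B (the rewrite author's own statement) =====
-- stated objective: alternative
-- what changed: Instead of running nine substring scans over the endpoint in priority order, B tokenizes the path once on slashes, looks each interior segment up in a dict keyed by segment name, and keeps the entry of minimum priority; a slash-delimited pattern occurs in the endpoint exactly when its word is an interior segment.
import Mathlib
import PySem

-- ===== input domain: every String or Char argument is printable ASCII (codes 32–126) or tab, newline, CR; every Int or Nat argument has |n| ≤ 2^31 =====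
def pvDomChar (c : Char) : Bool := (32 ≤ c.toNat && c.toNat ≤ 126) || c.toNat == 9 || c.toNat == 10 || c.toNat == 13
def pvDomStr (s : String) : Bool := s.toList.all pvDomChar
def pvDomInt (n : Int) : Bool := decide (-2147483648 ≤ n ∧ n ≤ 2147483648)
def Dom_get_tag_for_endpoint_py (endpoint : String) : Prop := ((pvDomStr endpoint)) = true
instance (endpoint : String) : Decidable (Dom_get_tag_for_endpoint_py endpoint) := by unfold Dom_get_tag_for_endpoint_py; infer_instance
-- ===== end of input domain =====

-- B replaces A's nine priority-ordered substring scans by a different algorithm: it tokenizes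
-- the path once with split('/'), looks each interior segment up in a dict keyed by segment
-- name, and keeps the entry of minimum priority ('/w/' ⊆ endpoint ⟺ w is an interior segment).

-- ===== PORT A =====
def get_tag_for_endpoint_py (endpoint : String) : String :=
  if PySem.Str.isIn "/vm/" endpoint then "VM Lifecycle"
  else if PySem.Str.isIn "/snapshot/" endpoint then "Snapshots"
  else if PySem.Str.isIn "/storage/" endpoint then "Storage"
  else if PySem.Str.isIn "/network/" endpoint then "Networking"
  else if PySem.Str.isIn "/device/" endpoint then "Devices"
  else if PySem.Str.isIn "/template/" endpoint then "Templates"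
  else if PySem.Str.isIn "/metrics/" endpoint then "Metrics"
  else if (["/audio/", "/video/"].any (fun x => PySem.Str.isIn x endpoint)) then "Audio/Video"
  else "System"

-- ===== PORT B =====
-- _SEGMENT_TAGS : segment of the path → (priority, tag)
def pvSegTags : PySem.Dict String (Int × String) :=
  PySem.Dict.mk
    [("vm", (0, "VM Lifecycle")), ("snapshot", (1, "Snapshots")), ("storage", (2, "Storage")),
     ("network", (3, "Networking")), ("device", (4, "Devices")), ("template", (5, "Templates")),
     ("metrics", (6, "Metrics")), ("audio", (7, "Audio/Video")), ("video", (8, "Audio/Video"))]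

-- the body of Source B's for-loop: keep the looked-up entry if it beats the best one so far
def pvBestStep (best : Option (Int × String)) (segment : String) : Option (Int × String) :=
  match pvSegTags.get? segment with
  | none => best
  | some entry =>
    match best with
    | none => some entry
    | some b => if entry.1 < b.1 then some entry else best

-- endpoint.split('/') : the separator "/" is nonempty, so Str.split? always returns some
def get_tag_for_endpoint_py_alt (endpoint : String) : String :=
  match (PySem.List.slice ((PySem.Str.split? endpoint "/").getD []) (some 1) (some (-1))).foldl
      pvBestStep none with
  | some best => best.2
  | none => "System"

-- ===== PRECONDITION & SPEC =====
def Spec_get_tag_for_endpoint_py (endpoint : String) (out : String) : Prop := out = get_tag_for_endpoint_py_alt endpoint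
instance (endpoint : String) (out : String) : Decidable (Spec_get_tag_for_endpoint_py endpoint out) := by unfold Spec_get_tag_for_endpoint_py; infer_instance

-- ===== CLAIM (what is proved, stated in full; the proofs are below) =====
def Claim_equal_get_tag_for_endpoint_py : Prop := ∀ (endpoint : String), Dom_get_tag_for_endpoint_py endpoint → Spec_get_tag_for_endpoint_py endpoint (get_tag_for_endpoint_py endpoint)

-- ===== LEMMAS AND PROOFS =====

-- reference recursion for splitting a char list on '/'
def pvSplitSlash : List Char → List (List Char)
  | [] => [[]]
  | c :: t =>
    if c = '/' then [] :: pvSplitSlash t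
    else
      match pvSplitSlash t with
      | [] => [[c]]
      | p :: ps => (c :: p) :: ps

theorem pvSplitSlash_ne_nil (l : List Char) : pvSplitSlash l ≠ [] := by
  cases l with
  | nil => simp [pvSplitSlash]
  | cons c t =>
    simp only [pvSplitSlash]
    split_ifs
    · simp
    · cases h : pvSplitSlash t <;> simp

theorem pv_go_spec (fuel : Nat) (l cur : List Char) (acc : List (List Char))
    (h : l.length < fuel) :
    PySem.Chars.splitOn.go ['/'] fuel l cur acc =
      acc.reverse ++ (cur.reverse ++ (pvSplitSlash l).headI) :: (pvSplitSlash l).tail := by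
  induction fuel generalizing l cur acc with
  | zero => omega
  | succ fuel ih =>
    cases l with
    | nil =>
      simp [PySem.Chars.splitOn.go, pvSplitSlash]
    | cons c t =>
      rw [PySem.Chars.splitOn.go]
      by_cases hc : c = '/'
      · subst hc
        rw [if_pos (by simp [List.isPrefixOf])]
        have hd : List.drop (List.length ['/']) ('/' :: t) = t := by simp
        rw [hd, ih t [] _ (by simp at h; omega)]
        rcases hsp : pvSplitSlash t with _ | ⟨p, ps⟩
        · exact absurd hsp (pvSplitSlash_ne_nil t)
        · simp [pvSplitSlash, hsp]
      · rw [if_neg (by simp [List.isPrefixOf]; exact fun hh => absurd hh.symm hc)]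
        rw [ih t (c :: cur) acc (by simp at h; omega)]
        rcases hsp : pvSplitSlash t with _ | ⟨p, ps⟩
        · exact absurd hsp (pvSplitSlash_ne_nil t)
        · simp [pvSplitSlash, hc, hsp]

theorem pv_splitOn_eq (s : List Char) : PySem.Chars.splitOn s ['/'] = pvSplitSlash s := by
  rw [PySem.Chars.splitOn, pv_go_spec (s.length + 1) s [] [] (by omega)]
  rcases hsp : pvSplitSlash s with _ | ⟨p, ps⟩
  · exact absurd hsp (pvSplitSlash_ne_nil s)
  · simp

theorem pvSplitSlash_cons_slash (t : List Char) :
    pvSplitSlash ('/' :: t) = [] :: pvSplitSlash t := by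
  simp [pvSplitSlash]

theorem pvSplitSlash_cons_ne (c : Char) (t : List Char) (hc : c ≠ '/') :
    pvSplitSlash (c :: t) = (c :: (pvSplitSlash t).headI) :: (pvSplitSlash t).tail := by
  rcases hsp : pvSplitSlash t with _ | ⟨p, ps⟩
  · exact absurd hsp (pvSplitSlash_ne_nil t)
  · simp [pvSplitSlash, hc, hsp]

theorem pv_prefix_iff (w t : List Char) (hw : '/' ∉ w) :
    w ++ ['/'] <+: t ↔ ((pvSplitSlash t).headI = w ∧ (pvSplitSlash t).tail ≠ []) := by
  induction t generalizing w with
  | nil =>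
    simp [pvSplitSlash]
  | cons c t ih =>
    by_cases hc : c = '/'
    · subst hc
      rw [pvSplitSlash_cons_slash]
      cases w with
      | nil => simp [pvSplitSlash_ne_nil t]
      | cons d w' =>
        have hd : d ≠ '/' := fun h => hw (by simp [h])
        simp only [List.cons_append, List.cons_prefix_cons, List.headI_cons, List.tail_cons]
        constructor
        · rintro ⟨h, -⟩; exact absurd h hd
        · rintro ⟨h, -⟩; simp at h
    · rw [pvSplitSlash_cons_ne c t hc]
      cases w with
      | nil =>
        simp only [List.nil_append, List.headI_cons, List.tail_cons]
        constructor
        · rintro h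
          rw [List.cons_prefix_cons] at h
          exact absurd h.1.symm hc
        · rintro ⟨h, -⟩; simp at h
      | cons d w' =>
        have hw' : '/' ∉ w' := fun h => hw (by simp [h])
        have hih := ih w' hw'
        simp only [List.cons_append, List.cons_prefix_cons, List.headI_cons, List.tail_cons, hih]
        constructor
        · rintro ⟨rfl, h1, h2⟩; exact ⟨by rw [h1], h2⟩
        · rintro ⟨h1, h2⟩
          injection h1 with hcd hw'eq
          exact ⟨hcd.symm, hw'eq, h2⟩

theorem pv_mem_dropLast_cons (w p : List Char) (ps : List (List Char)) :
    w ∈ (p :: ps).dropLast ↔ (ps ≠ [] ∧ p = w) ∨ w ∈ ps.dropLast := by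
  cases ps with
  | nil => simp
  | cons q qs =>
    simp [List.dropLast_cons₂, eq_comm]

theorem pv_infix_iff (w s : List Char) (hw : '/' ∉ w) :
    '/' :: (w ++ ['/']) <:+: s ↔ w ∈ (pvSplitSlash s).tail.dropLast := by
  induction s with
  | nil => simp [pvSplitSlash]
  | cons c t ih =>
    rw [List.infix_cons_iff]
    by_cases hc : c = '/'
    · subst hc
      rw [pvSplitSlash_cons_slash, List.tail_cons]
      rcases hsp : pvSplitSlash t with _ | ⟨p, ps⟩
      · exact absurd hsp (pvSplitSlash_ne_nil t)
      have hpre := pv_prefix_iff w t hw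
      rw [hsp] at hpre
      simp only [List.headI_cons, List.tail_cons] at hpre
      have hih := ih
      rw [hsp, List.tail_cons] at hih
      rw [pv_mem_dropLast_cons, hih]
      simp only [List.cons_prefix_cons, true_and, hpre]
      tauto
    · have hnp : ¬ ('/' :: (w ++ ['/']) <+: c :: t) := by
        rw [List.cons_prefix_cons]
        rintro ⟨h, -⟩; exact hc h.symm
      rw [pvSplitSlash_cons_ne c t hc, List.tail_cons]
      rcases hsp : pvSplitSlash t with _ | ⟨p, ps⟩
      · exact absurd hsp (pvSplitSlash_ne_nil t)
      have hih := ih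
      rw [hsp, List.tail_cons] at hih
      simp only [List.tail_cons, hnp, false_or, hih]

-- leftmost-minimum combination of two optional (priority, tag) entries
def pvMerge (a b : Option (Int × String)) : Option (Int × String) :=
  match a, b with
  | none, x => x
  | some a', none => some a'
  | some a', some b' => if b'.1 < a'.1 then some b' else some a'

theorem pvBestStep_eq_merge (best : Option (Int × String)) (s : String) :
    pvBestStep best s = pvMerge best (pvSegTags.get? s) := by
  rcases h : pvSegTags.get? s with _ | e <;> rcases best with _ | b <;>
    simp [pvBestStep, pvMerge, h]

theorem pvMerge_assoc (a b c : Option (Int × String)) :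
    pvMerge (pvMerge a b) c = pvMerge a (pvMerge b c) := by
  rcases a with _ | a
  · rfl
  rcases b with _ | b
  · rfl
  rcases c with _ | c
  · simp only [pvMerge]; split_ifs <;> rfl
  by_cases hba : b.1 < a.1 <;> by_cases hcb : c.1 < b.1 <;> by_cases hca : c.1 < a.1 <;>
    simp [pvMerge, hba, hcb, hca] <;> (exfalso; omega)

theorem pv_foldl_merge (segs : List String) (acc : Option (Int × String)) :
    segs.foldl pvBestStep acc = pvMerge acc (segs.foldl pvBestStep none) := by
  induction segs generalizing acc with
  | nil => rcases acc with _ | a <;> simp [pvMerge]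
  | cons s t ih =>
    rw [List.foldl_cons, List.foldl_cons, ih (pvBestStep acc s),
      ih (pvBestStep none s), pvBestStep_eq_merge, pvBestStep_eq_merge,
      show pvMerge none (pvSegTags.get? s) = pvSegTags.get? s from by
        rcases h : pvSegTags.get? s with _ | e <;> simp [pvMerge],
      pvMerge_assoc]

-- the minimum-priority entry hit by segs, written as the 9-way priority chain
def pvMin (segs : List String) : Option (Int × String) :=
  if "vm" ∈ segs then some (0, "VM Lifecycle")
  else if "snapshot" ∈ segs then some (1, "Snapshots")
  else if "storage" ∈ segs then some (2, "Storage")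
  else if "network" ∈ segs then some (3, "Networking")
  else if "device" ∈ segs then some (4, "Devices")
  else if "template" ∈ segs then some (5, "Templates")
  else if "metrics" ∈ segs then some (6, "Metrics")
  else if "audio" ∈ segs then some (7, "Audio/Video")
  else if "video" ∈ segs then some (8, "Audio/Video")
  else none

set_option maxHeartbeats 2000000 in
theorem pv_foldl_eq_pvMin (segs : List String) :
    segs.foldl pvBestStep none = pvMin segs := by
  induction segs with
  | nil => simp [pvMin]
  | cons s t ih =>
    rw [List.foldl_cons, pv_foldl_merge, pvBestStep_eq_merge,
      show pvMerge none (pvSegTags.get? s) = pvSegTags.get? s from by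
        rcases h : pvSegTags.get? s with _ | e <;> simp [pvMerge],
      ih]
    by_cases h1 : s = "vm"
    · subst h1; simp [pvSegTags, PySem.Dict.get?, pvMin, pvMerge]
      split_ifs <;> simp
    by_cases h2 : s = "snapshot"
    · subst h2; simp [pvSegTags, PySem.Dict.get?, pvMin, pvMerge]
      split_ifs <;> simp
    by_cases h3 : s = "storage"
    · subst h3; simp [pvSegTags, PySem.Dict.get?, pvMin, pvMerge]
      split_ifs <;> simp
    by_cases h4 : s = "network"
    · subst h4; simp [pvSegTags, PySem.Dict.get?, pvMin, pvMerge]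
      split_ifs <;> simp
    by_cases h5 : s = "device"
    · subst h5; simp [pvSegTags, PySem.Dict.get?, pvMin, pvMerge]
      split_ifs <;> simp
    by_cases h6 : s = "template"
    · subst h6; simp [pvSegTags, PySem.Dict.get?, pvMin, pvMerge]
      split_ifs <;> simp
    by_cases h7 : s = "metrics"
    · subst h7; simp [pvSegTags, PySem.Dict.get?, pvMin, pvMerge]
      split_ifs <;> simp
    by_cases h8 : s = "audio"
    · subst h8; simp [pvSegTags, PySem.Dict.get?, pvMin, pvMerge]
      split_ifs <;> simp
    by_cases h9 : s = "video"
    · subst h9; simp [pvSegTags, PySem.Dict.get?, pvMin, pvMerge]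
      split_ifs <;> simp
    have hget : pvSegTags.get? s = none := by
      simp [pvSegTags, PySem.Dict.get?, List.find?,
        beq_eq_false_iff_ne.mpr (Ne.symm h1), beq_eq_false_iff_ne.mpr (Ne.symm h2),
        beq_eq_false_iff_ne.mpr (Ne.symm h3), beq_eq_false_iff_ne.mpr (Ne.symm h4),
        beq_eq_false_iff_ne.mpr (Ne.symm h5), beq_eq_false_iff_ne.mpr (Ne.symm h6),
        beq_eq_false_iff_ne.mpr (Ne.symm h7), beq_eq_false_iff_ne.mpr (Ne.symm h8),
        beq_eq_false_iff_ne.mpr (Ne.symm h9)]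
    rw [hget]
    simp [pvMin, pvMerge, List.mem_cons, Ne.symm h1, Ne.symm h2, Ne.symm h3,
      Ne.symm h4, Ne.symm h5, Ne.symm h6, Ne.symm h7, Ne.symm h8, Ne.symm h9]

theorem pv_slice_tail_dropLast {α : Type} (xs : List α) :
    PySem.List.slice xs (some 1) (some (-1)) = xs.tail.dropLast := by
  cases xs with
  | nil => rfl
  | cons x t => simp [PySem.List.slice, List.dropLast_eq_take]

theorem pv_parts_eq (endpoint : String) :
    (PySem.Str.split? endpoint "/").getD [] = (pvSplitSlash endpoint.toList).map String.ofList := by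
  rw [PySem.Str.split?,
    show ("/" : String).toList = ['/'] from by decide, PySem.Chars.split?]
  simp [pv_splitOn_eq]

theorem pv_mem_map_ofList (w : List Char) (L : List (List Char)) :
    String.ofList w ∈ L.map String.ofList ↔ w ∈ L := by
  rw [List.mem_map]
  constructor
  · rintro ⟨x, hx, h⟩; rwa [String.ofList_inj.mp h] at hx
  · intro h; exact ⟨w, h, rfl⟩

-- ===== VERDICT (by name: the statement is the Claim_ definition above) =====
set_option maxHeartbeats 2000000 in
theorem get_tag_for_endpoint_py_spec : Claim_equal_get_tag_for_endpoint_py := by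
  intro endpoint _
  unfold Spec_get_tag_for_endpoint_py
  have hB : get_tag_for_endpoint_py_alt endpoint =
      match pvMin (((pvSplitSlash endpoint.toList).tail.dropLast).map String.ofList) with
      | some best => best.2
      | none => "System" := by
    rw [get_tag_for_endpoint_py_alt, pv_parts_eq, pv_slice_tail_dropLast,
      ← List.map_tail, ← List.map_dropLast, pv_foldl_eq_pvMin]
  rw [hB, get_tag_for_endpoint_py]
  have hmem : ∀ w : List Char,
      (String.ofList w ∈ ((pvSplitSlash endpoint.toList).tail.dropLast).map String.ofList) ↔
        w ∈ (pvSplitSlash endpoint.toList).tail.dropLast :=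
    fun w => pv_mem_map_ofList w _
  have hin : ∀ w : List Char, '/' ∉ w →
      ((PySem.Str.isIn (String.ofList ('/' :: (w ++ ['/']))) endpoint) = true ↔
        w ∈ (pvSplitSlash endpoint.toList).tail.dropLast) := by
    intro w hw
    rw [PySem.Str.isIn_iff_infix, String.toList_ofList, pv_infix_iff w _ hw]
  have h1 := hin ['v','m'] (by decide)
  have h2 := hin "snapshot".toList (by decide)
  have h3 := hin "storage".toList (by decide)
  have h4 := hin "network".toList (by decide)
  have h5 := hin "device".toList (by decide)
  have h6 := hin "template".toList (by decide)
  have h7 := hin "metrics".toList (by decide)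
  have h8 := hin "audio".toList (by decide)
  have h9 := hin "video".toList (by decide)
  simp only [List.any_cons, List.any_nil, Bool.or_false, Bool.or_eq_true, pvMin]
  rw [show ("/vm/" : String) = String.ofList ('/' :: (['v','m'] ++ ['/'])) from by decide,
    show ("/snapshot/" : String) = String.ofList ('/' :: ("snapshot".toList ++ ['/'])) from by decide,
    show ("/storage/" : String) = String.ofList ('/' :: ("storage".toList ++ ['/'])) from by decide,
    show ("/network/" : String) = String.ofList ('/' :: ("network".toList ++ ['/'])) from by decide,
    show ("/device/" : String) = String.ofList ('/' :: ("device".toList ++ ['/'])) from by decide,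
    show ("/template/" : String) = String.ofList ('/' :: ("template".toList ++ ['/'])) from by decide,
    show ("/metrics/" : String) = String.ofList ('/' :: ("metrics".toList ++ ['/'])) from by decide,
    show ("/audio/" : String) = String.ofList ('/' :: ("audio".toList ++ ['/'])) from by decide,
    show ("/video/" : String) = String.ofList ('/' :: ("video".toList ++ ['/'])) from by decide,
    show ("vm" : String) = String.ofList ['v','m'] from by decide,
    show ("snapshot" : String) = String.ofList "snapshot".toList from String.ofList_toList.symm,
    show ("storage" : String) = String.ofList "storage".toList from String.ofList_toList.symm,
    show ("network" : String) = String.ofList "network".toList from String.ofList_toList.symm,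
    show ("device" : String) = String.ofList "device".toList from String.ofList_toList.symm,
    show ("template" : String) = String.ofList "template".toList from String.ofList_toList.symm,
    show ("metrics" : String) = String.ofList "metrics".toList from String.ofList_toList.symm,
    show ("audio" : String) = String.ofList "audio".toList from String.ofList_toList.symm,
    show ("video" : String) = String.ofList "video".toList from String.ofList_toList.symm]
  simp only [String.toList_ofList]
  simp only [h1, h2, h3, h4, h5, h6, h7, h8, h9, hmem]
  by_cases mVM : ['v','m'] ∈ (pvSplitSlash endpoint.toList).tail.dropLast
  · simp [mVM]
  simp [mVM]
  by_cases mSnap : ['s','n','a','p','s','h','o','t'] ∈ (pvSplitSlash endpoint.toList).tail.dropLast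
  · simp [mSnap]
  simp [mSnap]
  by_cases mStor : ['s','t','o','r','a','g','e'] ∈ (pvSplitSlash endpoint.toList).tail.dropLast
  · simp [mStor]
  simp [mStor]
  by_cases mNet : ['n','e','t','w','o','r','k'] ∈ (pvSplitSlash endpoint.toList).tail.dropLast
  · simp [mNet]
  simp [mNet]
  by_cases mDev : ['d','e','v','i','c','e'] ∈ (pvSplitSlash endpoint.toList).tail.dropLast
  · simp [mDev]
  simp [mDev]
  by_cases mTem : ['t','e','m','p','l','a','t','e'] ∈ (pvSplitSlash endpoint.toList).tail.dropLast
  · simp [mTem]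
  simp [mTem]
  by_cases mMet : ['m','e','t','r','i','c','s'] ∈ (pvSplitSlash endpoint.toList).tail.dropLast
  · simp [mMet]
  simp [mMet]
  by_cases mAud : ['a','u','d','i','o'] ∈ (pvSplitSlash endpoint.toList).tail.dropLast
  · simp [mAud]
  simp [mAud]
  by_cases mVid : ['v','i','d','e','o'] ∈ (pvSplitSlash endpoint.toList).tail.dropLast
  · simp [mVid]
  simp [mVid]
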